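-- pv_equiv track=rewrite | github.com/sozyGithub/TUBES-DASPRO | helper.py | panjangMaksKolomTabel
-- ===== SOURCE A (Python) =====
-- def panjang(item):
--     # Helper panjang untuk mengecek panjang suatu item (list, string, dsb)
--
--     # KAMUS LOKAL
--     # counter: integer
--     # j: iterator
--
--     # ALGORITMA
--     counter = 0
--     for j in item:
--         counter += 1
--     return counter
--
-- def tambahArray(arr1, item):
--     # Spesifikasi
--
--     # KAMUS LOKAL
--
--     # ALGORITMA
--     return arr1 + item
--
-- def panjangMaksKolomTabel(data):
--     # Spesifikasi
--     # ...
--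
--     # KAMUS LOKAL
--     # ...
--
--     # ALGORITMA
--     panjang_maksimum_kolom = []
--     for i in range(panjang(data[0])):
--         maks_temp = 0
--         for j in range(panjang(data)):
--             if panjang(data[j][i]) > maks_temp:
--                 maks_temp = panjang(data[j][i])
--         panjang_maksimum_kolom = tambahArray(
--             panjang_maksimum_kolom, [maks_temp])
--     return panjang_maksimum_kolom
-- ===== SOURCE B (Python) =====
-- def panjangMaksKolomTabel(data):
--     # One row-major pass maintaining a running list of per-column maxima
--     # (instead of A's column-outer / row-inner rescanning with hand-rolled len).
--     n = len(data[0])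
--     result = [0] * n
--     for row in data:
--         result = [max(result[i], len(row[i])) for i in range(n)]
--     return result
-- ===== Notes on version B (the rewrite author's own statement) =====
-- stated objective: idiomatic
-- what changed: Replaced the column-outer loop that rescans all rows per column with a hand-rolled counting len by a single row-major pass maintaining a running list of per-column maxima via the builtins len and max.
import Mathlib
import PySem

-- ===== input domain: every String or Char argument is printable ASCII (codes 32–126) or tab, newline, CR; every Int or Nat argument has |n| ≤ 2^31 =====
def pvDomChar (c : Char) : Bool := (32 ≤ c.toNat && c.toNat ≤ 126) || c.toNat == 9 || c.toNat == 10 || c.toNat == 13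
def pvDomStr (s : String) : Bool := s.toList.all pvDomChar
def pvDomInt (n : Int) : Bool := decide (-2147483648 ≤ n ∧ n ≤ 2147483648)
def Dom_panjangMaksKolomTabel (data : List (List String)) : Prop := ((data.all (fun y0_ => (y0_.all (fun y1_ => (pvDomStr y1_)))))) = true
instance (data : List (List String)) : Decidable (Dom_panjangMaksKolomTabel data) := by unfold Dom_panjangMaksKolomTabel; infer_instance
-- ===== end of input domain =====

-- B replaces A's column-outer/row-inner rescanning (with a hand-rolled len loop) by one
-- row-major pass maintaining a running list of per-column maxima (objective: idiomatic).

-- ===== PORT A =====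
-- helper `panjang`: counts elements by iterating (used on rows-lists and on strings' chars)
def pvPanjang {α : Type} (item : List α) : Int := item.foldl (fun c _ => c + 1) 0

-- helper `tambahArray`
def pvTambahArray {α : Type} (arr1 item : List α) : List α := arr1 ++ item

def panjangMaksKolomTabel (data : List (List String)) : List Int :=
  (PySem.List.pyRange 0 (pvPanjang (PySem.List.pyGetD data 0 [])) 1).foldl (fun acc i =>
    let maks :=
      (PySem.List.pyRange 0 (pvPanjang data) 1).foldl (fun m j =>
        if pvPanjang (PySem.List.pyGetD (PySem.List.pyGetD data j []) i "").toList > m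
        then pvPanjang (PySem.List.pyGetD (PySem.List.pyGetD data j []) i "").toList
        else m) 0
    pvTambahArray acc [maks]) []

-- ===== PORT B =====
def panjangMaksKolomTabel_alt (data : List (List String)) : List Int :=
  let n : Nat := (PySem.List.pyGetD data 0 []).length
  data.foldl
    (fun result row =>
      (PySem.List.pyRange 0 (n : Int) 1).map (fun i =>
        max (PySem.List.pyGetD result i 0) (PySem.Str.len (PySem.List.pyGetD row i ""))))
    (List.replicate n (0 : Int))

-- ===== PRECONDITION & SPEC =====
-- Pre_ excludes exactly the inputs on which Python A raises IndexError:
-- empty data (data[0]) and ragged tables with a row shorter than the first row (data[j][i]).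
def Pre_panjangMaksKolomTabel (data : List (List String)) : Prop :=
  data ≠ [] ∧ ∀ row ∈ data, (data.headD []).length ≤ row.length
instance (data : List (List String)) : Decidable (Pre_panjangMaksKolomTabel data) := by
  unfold Pre_panjangMaksKolomTabel; infer_instance

def pvWitness_panjangMaksKolomTabel : List (List String) := [["ab", "c"], ["d", "efg"]]

def Spec_panjangMaksKolomTabel (data : List (List String)) (out : List Int) : Prop := out = panjangMaksKolomTabel_alt data
instance (data : List (List String)) (out : List Int) : Decidable (Spec_panjangMaksKolomTabel data out) := by unfold Spec_panjangMaksKolomTabel; infer_instance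

-- ===== CLAIM (what is proved, stated in full; the proofs are below) =====
def Claim_equal_panjangMaksKolomTabel : Prop := ∀ (data : List (List String)), Dom_panjangMaksKolomTabel data → Pre_panjangMaksKolomTabel data → Spec_panjangMaksKolomTabel data (panjangMaksKolomTabel data)

-- ===== LEMMAS AND PROOFS =====

theorem pvPanjang_eq {α : Type} (l : List α) : pvPanjang l = l.length := by
  have aux : ∀ (l : List α) (init : Int),
      l.foldl (fun c _ => c + 1) init = init + l.length := by
    intro l
    induction l with
    | nil => simp
    | cons x t ih => intro init; simp [List.foldl, ih]; ring
  simpa using aux l 0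

-- the common closed form both ports reach
theorem colmax_eq (data : List (List String)) (i : Int) :
    data.foldl (fun m row =>
        if pvPanjang (PySem.List.pyGetD row i "").toList > m
        then pvPanjang (PySem.List.pyGetD row i "").toList else m) 0
      = data.foldl (fun m row => max m (PySem.Str.len (PySem.List.pyGetD row i ""))) 0 := by
  congr 1
  funext m row
  rw [pvPanjang_eq, PySem.Str.len_eq]
  split <;> omega

-- B's row fold, characterised pointwise
theorem alt_fold_eq (n : Nat) (data : List (List String)) :
    ∀ (res : List Int), res.length = n →
      data.foldl
        (fun result row =>
          (PySem.List.pyRange 0 (n : Int) 1).map (fun i =>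
            max (PySem.List.pyGetD result i 0) (PySem.Str.len (PySem.List.pyGetD row i ""))))
        res
      = (PySem.List.pyRange 0 (n : Int) 1).map (fun i =>
          data.foldl (fun m row => max m (PySem.Str.len (PySem.List.pyGetD row i "")))
            (PySem.List.pyGetD res i 0)) := by
  induction data with
  | nil =>
      intro res hres
      simp only [List.foldl]
      subst hres
      exact (PySem.List.map_pyGetD_pyRange_zero' res 0).symm
  | cons row t ih =>
      intro res hres
      simp only [List.foldl_cons]
      rw [ih _ (by simp [PySem.List.length_pyRange_one])]
      apply List.map_congr_left
      intro i hi
      have hmem := (PySem.List.mem_pyRange_one).1 hi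
      rw [PySem.List.pyGetD_map_pyRange_of_nonneg _ _ _ _ hmem.1 hmem.2]

-- ===== VERDICT (by name: the statement is the Claim_ definition above) =====
theorem panjangMaksKolomTabel_spec : Claim_equal_panjangMaksKolomTabel := by
  intro data _ _
  unfold Spec_panjangMaksKolomTabel panjangMaksKolomTabel panjangMaksKolomTabel_alt pvTambahArray
  rw [PySem.List.foldl_append_singleton_eq_map]
  rw [alt_fold_eq _ _ _ (by simp)]
  rw [pvPanjang_eq (PySem.List.pyGetD data 0 []), pvPanjang_eq data]
  apply List.map_congr_left
  intro i hi
  have hmem := (PySem.List.mem_pyRange_one).1 hi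
  rw [PySem.List.foldl_pyRange_zero_pyGetD' data ([] : List String)
      (fun m row =>
        if pvPanjang (PySem.List.pyGetD row i "").toList > m
        then pvPanjang (PySem.List.pyGetD row i "").toList else m) 0]
  rw [colmax_eq]
  congr 1
  have hn : (0 : Nat) ≤ (PySem.List.pyGetD data 0 []).length := by omega
  have : PySem.List.pyGetD (List.replicate (PySem.List.pyGetD data 0 []).length (0 : Int)) i 0 = 0 := by
    by_cases h : 0 ≤ i
    · rw [PySem.List.pyGetD_of_nonneg (h := h)]
      have hlt : i.toNat < (PySem.List.pyGetD data 0 []).length := by omega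
      rw [List.getD_eq_getElem _ _ (by simpa using hlt)]
      simp
    · simp [PySem.List.pyGetD, PySem.List.pyGet?, PySem.List.pyIdx?]
      omega
  rw [this]
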